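-- pv_equiv track=rewrite | github.com/kaikkjp/alive-memory | sim/metrics/budget_efficiency.py | _split_days
-- ===== SOURCE A (Python) =====
-- def _split_days(cycles: list[dict]) -> list[list[dict]]:
--     """Split cycles into per-day groups using sleep boundaries.
--
--     A "day" runs from one sleep cycle to the next.
--     """
--     if not cycles:
--         return []
--
--     days: list[list[dict]] = []
--     current_day: list[dict] = []
--
--     for c in cycles:
--         ctype = c.get("type") or c.get("cycle_type", "idle")
--         if ctype == "sleep":
--             if current_day:
--                 days.append(current_day)
--             current_day = []
--         else:
--             current_day.append(c)
--
--     # Final partial day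
--     if current_day:
--         days.append(current_day)
--
--     return days
-- ===== SOURCE B (Python) =====
-- def _split_days(cycles: list[dict]) -> list[list[dict]]:
--     """Split cycles into per-day groups using sleep boundaries.
--
--     Builds the segment list back-to-front (keeping empty segments at every
--     sleep boundary), then drops the empty segments.
--     """
--     segs = [[]]
--     for c in reversed(cycles):
--         ctype = c.get("type") or c.get("cycle_type", "idle")
--         if ctype == "sleep":
--             segs = [[]] + segs
--         else:
--             segs[0] = [c] + segs[0]
--     return [d for d in segs if d]
-- ===== Notes on version B (the rewrite author's own statement) =====
-- stated objective: alternative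
-- what changed: Replaces the forward accumulator/flush loop with a back-to-front fold that keeps every (possibly empty) sleep-delimited segment and filters out the empty ones at the end.
import Mathlib
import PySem

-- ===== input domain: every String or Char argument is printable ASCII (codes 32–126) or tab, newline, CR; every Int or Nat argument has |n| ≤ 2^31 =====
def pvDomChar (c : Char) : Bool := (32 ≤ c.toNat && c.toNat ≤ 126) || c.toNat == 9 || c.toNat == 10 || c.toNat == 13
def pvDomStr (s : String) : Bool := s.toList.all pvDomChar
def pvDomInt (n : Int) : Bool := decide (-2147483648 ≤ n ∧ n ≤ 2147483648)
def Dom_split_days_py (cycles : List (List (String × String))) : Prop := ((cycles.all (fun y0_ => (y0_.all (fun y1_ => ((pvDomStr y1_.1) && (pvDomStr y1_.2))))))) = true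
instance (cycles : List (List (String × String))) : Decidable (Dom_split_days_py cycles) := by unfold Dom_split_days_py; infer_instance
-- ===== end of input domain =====

-- B builds the segment list back-to-front keeping empty segments, then filters them out;
-- same return value as A's forward accumulator/flush loop (alternative decomposition, no speed claim).

-- shared helper: Python's `c.get("type") or c.get("cycle_type", "idle")`
-- (the `or` falls through both on a missing key and on an empty string, which is falsy)
def ctypeOf (c : List (String × String)) : String :=
  match (PySem.Dict.mk c).get? "type" with
  | some s => if s = "" then (PySem.Dict.mk c).getD "cycle_type" "idle" else s
  | none => (PySem.Dict.mk c).getD "cycle_type" "idle"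

-- ===== PORT A =====
def split_days_py (cycles : List (List (String × String))) : List (List (List (String × String))) :=
  if cycles = [] then []
  else
    let st := cycles.foldl
      (fun (st : List (List (List (String × String))) × List (List (String × String))) c =>
        if ctypeOf c = "sleep" then
          (if st.2 ≠ [] then st.1 ++ [st.2] else st.1, [])
        else (st.1, st.2 ++ [c])) ([], [])
    if st.2 ≠ [] then st.1 ++ [st.2] else st.1

-- ===== PORT B =====
-- reversed-iteration loop = foldr; `segs[0] = [c] + segs[0]` updates the head
-- (segs is never empty, so headD/tail are exact for Source B's segs[0]/segs[1:])
def split_days_py_alt (cycles : List (List (String × String))) : List (List (List (String × String))) :=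
  let segs := cycles.foldr
    (fun c segs => if ctypeOf c = "sleep" then [] :: segs else (c :: segs.headD []) :: segs.tail)
    [[]]
  segs.filter (· ≠ [])

-- ===== PRECONDITION & SPEC =====
def Spec_split_days_py (cycles : List (List (String × String))) (out : List (List (List (String × String)))) : Prop := out = split_days_py_alt cycles
instance (cycles : List (List (String × String))) (out : List (List (List (String × String)))) : Decidable (Spec_split_days_py cycles out) := by unfold Spec_split_days_py; infer_instance

-- ===== CLAIM (what is proved, stated in full; the proofs are below) =====
def Claim_equal_split_days_py : Prop := ∀ (cycles : List (List (String × String))), Dom_split_days_py cycles → Spec_split_days_py cycles (split_days_py cycles)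

-- ===== LEMMAS AND PROOFS =====

def segsOf (cycles : List (List (String × String))) : List (List (List (String × String))) :=
  cycles.foldr
    (fun c segs => if ctypeOf c = "sleep" then [] :: segs else (c :: segs.headD []) :: segs.tail)
    [[]]

theorem segsOf_ne_nil (cycles : List (List (String × String))) : segsOf cycles ≠ [] := by
  cases cycles with
  | nil => simp [segsOf]
  | cons c rest =>
    simp only [segsOf, List.foldr_cons]
    split <;> simp

theorem loop_invariant (cycles : List (List (String × String)))
    (days : List (List (List (String × String)))) (cur : List (List (String × String))) :
    (let st := cycles.foldl
      (fun (st : List (List (List (String × String))) × List (List (String × String))) c =>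
        if ctypeOf c = "sleep" then
          (if st.2 ≠ [] then st.1 ++ [st.2] else st.1, [])
        else (st.1, st.2 ++ [c])) (days, cur)
      if st.2 ≠ [] then st.1 ++ [st.2] else st.1)
    = days ++ (((cur ++ (segsOf cycles).headD []) :: (segsOf cycles).tail).filter (· ≠ [])) := by
  induction cycles generalizing days cur with
  | nil =>
    simp only [segsOf, List.foldr_nil, List.foldl_nil, List.headD, List.tail,
      List.filter, List.append_nil]
    by_cases h : cur = [] <;> simp [h]
  | cons c rest ih =>
    obtain ⟨h, t, hst⟩ : ∃ h t, segsOf rest = h :: t := by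
      cases hr : segsOf rest with
      | nil => exact absurd hr (segsOf_ne_nil rest)
      | cons a b => exact ⟨a, b, rfl⟩
    by_cases hc : ctypeOf c = "sleep"
    · simp only [List.foldl_cons, hc, ite_true]
      rw [ih]
      have hseg : segsOf (c :: rest) = [] :: segsOf rest := by
        simp [segsOf, hc]
      rw [hseg, hst]
      simp only [List.headD, List.tail, List.nil_append, List.filter]
      by_cases hcur : cur = [] <;> simp [hcur]
    · simp only [List.foldl_cons, hc, ite_false]
      rw [ih]
      have hseg : segsOf (c :: rest) = (c :: (segsOf rest).headD []) :: (segsOf rest).tail := by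
        simp [segsOf, hc]
      rw [hseg, hst]
      simp

-- ===== VERDICT (by name: the statement is the Claim_ definition above) =====
theorem split_days_py_spec : Claim_equal_split_days_py := by
  intro cycles _
  show split_days_py cycles = split_days_py_alt cycles
  cases cycles with
  | nil => simp [split_days_py, split_days_py_alt]
  | cons c rest =>
    obtain ⟨h, t, hst⟩ : ∃ h t, segsOf (c :: rest) = h :: t := by
      cases hr : segsOf (c :: rest) with
      | nil => exact absurd hr (segsOf_ne_nil _)
      | cons a b => exact ⟨a, b, rfl⟩
    have hB : split_days_py_alt (c :: rest) = (segsOf (c :: rest)).filter (· ≠ []) := rfl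
    have hA := loop_invariant (c :: rest) [] []
    simp only [List.nil_append] at hA
    rw [split_days_py, if_neg (by simp), hA, hB, hst]
    simp
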